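-- pv_equiv track=rewrite | github.com/leebase/lunduke-transcripts | src/lunduke_transcripts/app/tutorial_pipeline.py | _collect_advisory_messages
-- ===== SOURCE A (Python) =====
-- from typing import Any
--
-- def _collect_advisory_messages(
--     adversarial_report: dict[str, Any] | None,
-- ) -> list[str]:
--     if not adversarial_report:
--         return []
--     messages: list[str] = []
--     for finding in adversarial_report.get("findings", []):
--         message = str(finding.get("message") or "").strip()
--         if message and message not in messages:
--             messages.append(message)
--     return messages
-- ===== SOURCE B (Python) =====
-- from typing import Any
--
-- def _collect_advisory_messages(
--     adversarial_report: "dict[str, Any] | None",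
-- ) -> "list[str]":
--     if not adversarial_report:
--         return []
--     rest = [
--         str(finding.get("message") or "").strip()
--         for finding in adversarial_report.get("findings", [])
--     ]
--     rest = [m for m in rest if m]
--     # repeatedly emit the head and delete all of its later copies (nub by
--     # head-and-filter), so no 'seen' structure is ever consulted
--     result: list[str] = []
--     while rest:
--         head = rest[0]
--         result.append(head)
--         rest = [x for x in rest[1:] if x != head]
--     return result
-- ===== Notes on version B (the rewrite author's own statement) =====
-- stated objective: alternative
-- what changed: B strips and filters the messages up front and then deduplicates by the head-and-filter (nub) scheme: emit the first element and delete every later copy of it from the remaining list, repeating until empty, so there is no growing 'seen' accumulator and no membership test against the result.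
import Mathlib
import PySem

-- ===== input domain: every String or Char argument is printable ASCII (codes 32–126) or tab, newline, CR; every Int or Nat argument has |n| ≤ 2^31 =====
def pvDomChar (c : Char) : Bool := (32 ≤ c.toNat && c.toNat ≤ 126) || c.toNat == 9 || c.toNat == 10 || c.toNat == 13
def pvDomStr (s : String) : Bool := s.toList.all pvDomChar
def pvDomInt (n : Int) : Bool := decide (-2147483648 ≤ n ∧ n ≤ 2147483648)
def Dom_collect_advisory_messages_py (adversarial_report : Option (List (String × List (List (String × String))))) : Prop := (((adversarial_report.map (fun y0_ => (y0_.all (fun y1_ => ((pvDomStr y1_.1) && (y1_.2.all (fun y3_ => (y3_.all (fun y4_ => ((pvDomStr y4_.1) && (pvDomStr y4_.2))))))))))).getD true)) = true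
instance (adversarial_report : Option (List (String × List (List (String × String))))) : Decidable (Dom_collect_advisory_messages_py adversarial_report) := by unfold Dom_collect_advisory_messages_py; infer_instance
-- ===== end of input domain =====

-- B deduplicates by the head-and-filter (nub) scheme — emit the head, delete its later
-- copies, repeat — instead of A's membership scan against the growing result list.

-- ===== PORT A =====
-- assoc-list lookup with default: Python dict.get(k, dflt), first match
def pvAssocGetD {α : Type} (d : List (String × α)) (k : String) (dflt : α) : α :=
  ((d.find? (fun p => p.1 == k)).map (·.2)).getD dflt

def collect_advisory_messages_py (adversarial_report : Option (List (String × List (List (String × String))))) : List String :=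
  match adversarial_report with
  | none => []
  | some d =>
    if d = [] then []
    else
      (pvAssocGetD d "findings" []).foldl
        (fun messages finding =>
          let message := PySem.Str.strip (pvAssocGetD finding "message" "")
          if message ≠ "" ∧ message ∉ messages then messages ++ [message] else messages)
        []

-- ===== PORT B =====
-- B's while loop: take the head, drop its later copies from the remainder, recurse
def pvNub : List String → List String
  | [] => []
  | x :: xs => x :: pvNub (xs.filter (fun y => y ≠ x))
termination_by l => l.length
decreasing_by simpa using Nat.lt_succ_of_le ((List.length_filter_le _ _).trans (by simp))

def collect_advisory_messages_py_alt (adversarial_report : Option (List (String × List (List (String × String))))) : List String :=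
  match adversarial_report with
  | none => []
  | some d =>
    if d = [] then []
    else
      pvNub ((((pvAssocGetD d "findings" []).map
        (fun finding => PySem.Str.strip (pvAssocGetD finding "message" ""))).filter
          (fun m => m ≠ "")))

-- ===== PRECONDITION & SPEC =====
def Spec_collect_advisory_messages_py (adversarial_report : Option (List (String × List (List (String × String))))) (out : List String) : Prop := out = collect_advisory_messages_py_alt adversarial_report
instance (adversarial_report : Option (List (String × List (List (String × String))))) (out : List String) : Decidable (Spec_collect_advisory_messages_py adversarial_report out) := by unfold Spec_collect_advisory_messages_py; infer_instance

-- ===== CLAIM (what is proved, stated in full; the proofs are below) =====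
def Claim_equal_collect_advisory_messages_py : Prop := ∀ (adversarial_report : Option (List (String × List (List (String × String))))), Dom_collect_advisory_messages_py adversarial_report → Spec_collect_advisory_messages_py adversarial_report (collect_advisory_messages_py adversarial_report)

-- ===== LEMMAS AND PROOFS =====

-- A's fold over findings is B's map (message hoisted out of the loop body)
lemma fold_map_eq (fs : List (List (String × String))) (acc : List String) :
    fs.foldl
      (fun messages finding =>
        let message := PySem.Str.strip (pvAssocGetD finding "message" "")
        if message ≠ "" ∧ message ∉ messages then messages ++ [message] else messages)
      acc
    = (fs.map (fun finding => PySem.Str.strip (pvAssocGetD finding "message" ""))).foldl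
        (fun messages m => if m ≠ "" ∧ m ∉ messages then messages ++ [m] else messages)
        acc := by
  induction fs generalizing acc with
  | nil => rfl
  | cons f fs ih => simp only [List.foldl_cons, List.map_cons]; exact ih _

-- unfolding equations of the well-founded pvNub
lemma pvNub_nil : pvNub [] = [] := by rw [pvNub]
lemma pvNub_cons (x : String) (xs : List String) :
    pvNub (x :: xs) = x :: pvNub (xs.filter (fun y => y ≠ x)) := by rw [pvNub]

-- A's scan-and-append fold equals acc ++ nub of the not-yet-seen non-empty messages
lemma fold_eq_nub (l : List String) (acc : List String) :
    l.foldl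
      (fun messages m => if m ≠ "" ∧ m ∉ messages then messages ++ [m] else messages)
      acc
    = acc ++ pvNub (l.filter (fun m => decide (m ≠ "" ∧ m ∉ acc))) := by
  induction l generalizing acc with
  | nil => simp [pvNub_nil]
  | cons m l ih =>
    simp only [List.foldl_cons, List.filter_cons]
    by_cases hc : m ≠ "" ∧ m ∉ acc
    · have hfl : l.filter (fun x => decide (x ≠ "" ∧ x ∉ acc ++ [m]))
          = (l.filter (fun x => decide (x ≠ "" ∧ x ∉ acc))).filter (fun y => y ≠ m) := by
        rw [List.filter_filter]
        refine List.filter_congr (fun x _ => ?_)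
        by_cases h1 : x = m <;> by_cases h2 : x = "" <;> by_cases h3 : x ∈ acc <;>
          simp [h1, h2, h3, List.mem_append]
      rw [if_pos hc, ih (acc ++ [m]),
        show (decide (m ≠ "" ∧ m ∉ acc)) = true by simpa using hc,
        if_pos rfl, pvNub_cons, hfl]
      simp [List.append_assoc]
    · rw [if_neg hc,
        show (decide (m ≠ "" ∧ m ∉ acc)) = false by simpa using hc]
      simpa using ih acc

-- ===== VERDICT (by name: the statement is the Claim_ definition above) =====
theorem collect_advisory_messages_py_spec : Claim_equal_collect_advisory_messages_py := by
  intro r _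
  unfold Spec_collect_advisory_messages_py collect_advisory_messages_py collect_advisory_messages_py_alt
  match r with
  | none => rfl
  | some d =>
    by_cases hd : d = []
    · simp [hd]
    · simp only [if_neg hd]
      rw [fold_map_eq, fold_eq_nub]
      simp only [List.nil_append]
      congr 1
      exact List.filter_congr (fun x _ => by simp)
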